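-- pv_equiv track=rewrite | github.com/adrian-untu/Python2022 | Advanced_RSync/advanced_rsync.py | get_zip_folder
-- ===== SOURCE A (Python) =====
-- def get_zip_folder(path):
--     """
--     This function will get the name of the zip folder
--     @params: path -> localization of zip to be able to create a folder
--     """
--     split = path.split("\\")
--     folder = ""
--     index = 0
--     while index < len(split) - 1:
--         folder += split[index] + "\\"
--         index += 1
--     folder += split[index]
--     # We will return the name without the .zip part
--     return folder[0:-4]
-- ===== SOURCE B (Python) =====
-- def get_zip_folder(path):
--     """
--     This function will get the name of the zip folder
--     @params: path -> localization of zip to be able to create a folder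
--     """
--     # Splitting on "\\" and rejoining with "\\" reconstructs path exactly,
--     # so the whole function is just dropping the last 4 characters.
--     return path[:-4]
-- ===== Notes on version B (the rewrite author's own statement) =====
-- stated objective: simpler
-- what changed: The split-on-backslash / index loop / rejoin (which reconstructs the original string) is removed entirely; B returns the single slice path[:-4].
import Mathlib
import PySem

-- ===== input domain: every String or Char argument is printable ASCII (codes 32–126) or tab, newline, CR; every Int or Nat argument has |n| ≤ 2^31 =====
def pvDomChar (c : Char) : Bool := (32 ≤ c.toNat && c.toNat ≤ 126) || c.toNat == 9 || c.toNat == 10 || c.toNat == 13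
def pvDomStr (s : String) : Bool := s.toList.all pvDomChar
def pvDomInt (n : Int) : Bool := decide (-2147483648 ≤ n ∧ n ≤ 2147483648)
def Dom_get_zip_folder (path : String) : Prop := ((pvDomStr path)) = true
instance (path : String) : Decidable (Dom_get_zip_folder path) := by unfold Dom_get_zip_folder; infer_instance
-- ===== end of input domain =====

-- B removes the redundant split / loop / rejoin (which reconstructs the string) and returns the single slice path[:-4].


-- ===== PORT A =====
-- the while loop: appends split[index] ++ "\" while index < len(split)-1, then appends split[index]
def get_zip_folder_loop : List (List Char) → List Char
  | [] => []            -- unreachable: Python's split always returns a non-empty list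
  | [x] => x
  | x :: y :: rest => x ++ '\\' :: get_zip_folder_loop (y :: rest)

def get_zip_folder (path : String) : String :=
  let split := PySem.Chars.splitOn path.toList ['\\']
  let folder := get_zip_folder_loop split
  String.ofList (PySem.List.slice folder (some 0) (some (-4)))

-- ===== PORT B =====
def get_zip_folder_alt (path : String) : String :=
  String.ofList (PySem.List.slice path.toList none (some (-4)))

-- ===== PRECONDITION & SPEC =====
def Spec_get_zip_folder (path : String) (out : String) : Prop := out = get_zip_folder_alt path
instance (path : String) (out : String) : Decidable (Spec_get_zip_folder path out) := by unfold Spec_get_zip_folder; infer_instance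

-- ===== CLAIM (what is proved, stated in full; the proofs are below) =====
def Claim_equal_get_zip_folder : Prop := ∀ (path : String), Dom_get_zip_folder path → Spec_get_zip_folder path (get_zip_folder path)

-- ===== LEMMAS AND PROOFS =====

-- the loop computes "\".join(split)
theorem get_zip_folder_loop_eq_join (xs : List (List Char)) :
    get_zip_folder_loop xs = PySem.Chars.join ['\\'] xs := by
  match xs with
  | [] => simp [get_zip_folder_loop, PySem.Chars.join_nil]
  | [x] => simp [get_zip_folder_loop, PySem.Chars.join_singleton]
  | x :: y :: rest =>
    rw [get_zip_folder_loop, get_zip_folder_loop_eq_join (y :: rest),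
        PySem.Chars.join_cons_cons]
    simp

theorem join_singleton_snoc (sep : List Char) (xs : List (List Char)) (y : List Char) :
    PySem.Chars.join sep (xs ++ [y]) =
      PySem.Chars.join sep xs ++ (if xs = [] then [] else sep) ++ y := by
  induction xs with
  | nil => simp [PySem.Chars.join_nil, PySem.Chars.join_singleton]
  | cons x xs ih =>
    match xs with
    | [] => simp [PySem.Chars.join_cons_cons, PySem.Chars.join_singleton]
    | z :: zs =>
      have : x :: z :: zs ++ [y] = x :: z :: (zs ++ [y]) := by simp
      rw [this, PySem.Chars.join_cons_cons, show z :: (zs ++ [y]) = (z :: zs) ++ [y] by simp,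
          ih, PySem.Chars.join_cons_cons]
      simp


-- invariant of splitOn.go: joining the pieces back restores the consumed input
theorem join_splitOn_go (sep : List Char) (fuel : Nat) (l cur : List Char)
    (acc : List (List Char)) :
    PySem.Chars.join sep (PySem.Chars.splitOn.go sep fuel l cur acc) =
      PySem.Chars.join sep acc.reverse ++
        (if acc = [] then [] else sep) ++ cur.reverse ++ l := by
  induction fuel generalizing l cur acc with
  | zero =>
    rw [PySem.Chars.splitOn.go]
    rw [show ((cur.reverse ++ l) :: acc).reverse = acc.reverse ++ [cur.reverse ++ l] by simp,
        join_singleton_snoc]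
    simp only [List.reverse_eq_nil_iff, List.append_assoc]
  | succ fuel ih =>
    match l with
    | [] =>
      rw [PySem.Chars.splitOn.go]
      rw [show (cur.reverse :: acc).reverse = acc.reverse ++ [cur.reverse] by simp,
          join_singleton_snoc]
      simp only [List.reverse_eq_nil_iff, List.append_assoc, List.append_nil]
      omega
    | c :: rest =>
      rw [PySem.Chars.splitOn.go]
      by_cases hpre : sep.isPrefixOf (c :: rest) = true
      · simp only [hpre, if_true]
        rw [ih]
        rw [show (cur.reverse :: acc).reverse = acc.reverse ++ [cur.reverse] by simp,
            join_singleton_snoc]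
        have hp : sep <+: (c :: rest) := List.isPrefixOf_iff_prefix.mp hpre
        obtain ⟨t, ht⟩ := hp
        rw [← ht, List.drop_left]
        simp [List.reverse_eq_nil_iff]
      · rw [if_neg (by simp_all)]
        rw [ih]
        simp

-- the join of python's split reconstructs the original string
theorem join_splitOn (s sep : List Char) :
    PySem.Chars.join sep (PySem.Chars.splitOn s sep) = s := by
  rw [PySem.Chars.splitOn, join_splitOn_go]
  simp [PySem.Chars.join_nil]

-- ===== VERDICT (by name: the statement is the Claim_ definition above) =====
theorem get_zip_folder_spec : Claim_equal_get_zip_folder := by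
  intro path _
  show get_zip_folder path = get_zip_folder_alt path
  show String.ofList (PySem.List.slice
      (get_zip_folder_loop (PySem.Chars.splitOn path.toList ['\\'])) (some 0) (some (-4))) =
    String.ofList (PySem.List.slice path.toList none (some (-4)))
  rw [get_zip_folder_loop_eq_join, join_splitOn, PySem.List.slice_zero_start]
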